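-- pv_equiv track=rewrite | github.com/opengisch/xlsform2qgis | src/xlsform2qgis/expressions/expression.py | format_date_codes
-- ===== SOURCE A (Python) =====
-- def format_date_codes(xlsform_format: str) -> str:
--     conversion_map = {
--         r"%Y": "yyyy",
--         r"%y": "yy",
--         r"%m": "MM",
--         r"%n": "M",
--         r"%b": "MMM",
--         r"%d": "dd",
--         r"%e": "d",
--         r"%a": "ddd",
--     }
--
--     for xls_code, qgis_code in conversion_map.items():
--         xlsform_format = xlsform_format.replace(xls_code, qgis_code)
--
--     return xlsform_format
-- ===== SOURCE B (Python) =====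
-- def format_date_codes(xlsform_format: str) -> str:
--     # single left-to-right scan; codes keyed by the character after '%'
--     conversion_map = {
--         "Y": "yyyy",
--         "y": "yy",
--         "m": "MM",
--         "n": "M",
--         "b": "MMM",
--         "d": "dd",
--         "e": "d",
--         "a": "ddd",
--     }
--     out = []
--     i = 0
--     n = len(xlsform_format)
--     while i < n:
--         if xlsform_format[i] == "%" and i + 1 < n and xlsform_format[i + 1] in conversion_map:
--             out.append(conversion_map[xlsform_format[i + 1]])
--             i += 2
--         else:
--             out.append(xlsform_format[i])
--             i += 1
--     return "".join(out)
-- ===== Notes on version B (the rewrite author's own statement) =====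
-- stated objective: alternative
-- what changed: B replaces A's eight sequential whole-string str.replace passes by one left-to-right scan that looks each '%x' two-char window up in the conversion map once.
-- intended difference: On inputs containing the substring '%%Y', A's later '%y' pass re-matches the '%'+'yyyy' text produced by its '%Y' pass and eats the preceding literal '%' (A('%%Y')='yyyyy'), while B converts each code exactly once and keeps the literal '%' (B('%%Y')='%yyyy'), which is the intended conversion. — e.g. on format_date_codes("%%Y"): A returns "yyyyy", B returns "%yyyy"
import Mathlib
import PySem

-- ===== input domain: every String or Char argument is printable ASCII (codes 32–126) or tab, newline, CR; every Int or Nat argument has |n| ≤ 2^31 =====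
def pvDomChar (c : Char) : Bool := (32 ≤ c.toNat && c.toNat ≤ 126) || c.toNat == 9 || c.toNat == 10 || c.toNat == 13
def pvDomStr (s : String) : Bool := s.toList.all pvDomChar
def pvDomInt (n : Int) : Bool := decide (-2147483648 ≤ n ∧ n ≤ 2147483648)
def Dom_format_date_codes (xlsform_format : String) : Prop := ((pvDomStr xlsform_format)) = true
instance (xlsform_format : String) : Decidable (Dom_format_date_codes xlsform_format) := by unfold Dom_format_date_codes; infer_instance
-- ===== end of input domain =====

-- B replaces A's eight sequential str.replace passes by one left-to-right scan (alternative
-- decomposition, same cost class); on '%%Y' A's passes cascade while B converts once (see D_ below).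

-- ===== PORT A =====
def format_date_codes (xlsform_format : String) : String :=
  -- conversion_map = {"%Y": "yyyy", …}; for each (xls_code, qgis_code): replace
  (PySem.Dict.ofList [("%Y", "yyyy"), ("%y", "yy"), ("%m", "MM"), ("%n", "M"),
      ("%b", "MMM"), ("%d", "dd"), ("%e", "d"), ("%a", "ddd")]
    : PySem.Dict String String).items.foldl
    (fun s p => PySem.Str.replace s p.1 p.2) xlsform_format

-- ===== PORT B =====
-- conversion_map of Source B, keyed by the character following '%'
def qgisCode? (c : Char) : Option (List Char) :=
  if c = 'Y' then some ['y', 'y', 'y', 'y']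
  else if c = 'y' then some ['y', 'y']
  else if c = 'm' then some ['M', 'M']
  else if c = 'n' then some ['M']
  else if c = 'b' then some ['M', 'M', 'M']
  else if c = 'd' then some ['d', 'd']
  else if c = 'e' then some ['d']
  else if c = 'a' then some ['d', 'd', 'd']
  else none

-- the while loop of Source B: advance by 2 on a recognised '%x' window, else copy one char
def fdcScan : List Char → List Char
  | [] => []
  | [c] => [c]
  | c :: c2 :: t =>
    if c = '%' then
      match qgisCode? c2 with
      | some v => v ++ fdcScan t
      | none => c :: fdcScan (c2 :: t)
    else c :: fdcScan (c2 :: t)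

def format_date_codes_alt (xlsform_format : String) : String :=
  String.ofList (fdcScan xlsform_format.toList)

-- ===== PRECONDITION & SPEC =====
-- On inputs containing '%%Y', A's '%y' pass re-matches the '%'+'yyyy' produced by its '%Y' pass
-- and eats the literal '%' (A "%%Y" = "yyyyy"); B converts each code once and keeps the '%'
-- (B "%%Y" = "%yyyy"), which is the intended conversion.
def D_format_date_codes (xlsform_format : String) : Prop :=
  PySem.Str.isIn "%%Y" xlsform_format = true
instance (xlsform_format : String) : Decidable (D_format_date_codes xlsform_format) := by
  unfold D_format_date_codes; infer_instance

def Spec_format_date_codes (xlsform_format : String) (out : String) : Prop :=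
  ¬ D_format_date_codes xlsform_format → out = format_date_codes_alt xlsform_format
instance (xlsform_format : String) (out : String) : Decidable (Spec_format_date_codes xlsform_format out) := by
  unfold Spec_format_date_codes; infer_instance

def pvDiffWitness_format_date_codes : String := "%%Y"
def pvDiffWitnessOut_format_date_codes : String × String := ("yyyyy", "%yyyy")

-- ===== CLAIM (what is proved, stated in full; the proofs are below) =====
def Claim_unchanged_format_date_codes : Prop := ∀ (xlsform_format : String), Dom_format_date_codes xlsform_format → Spec_format_date_codes xlsform_format (format_date_codes xlsform_format)
def Claim_changed_format_date_codes : Prop := Dom_format_date_codes (pvDiffWitness_format_date_codes) ∧ D_format_date_codes (pvDiffWitness_format_date_codes) ∧ format_date_codes (pvDiffWitness_format_date_codes) = pvDiffWitnessOut_format_date_codes.1 ∧ format_date_codes_alt (pvDiffWitness_format_date_codes) = pvDiffWitnessOut_format_date_codes.2 ∧ pvDiffWitnessOut_format_date_codes.1 ≠ pvDiffWitnessOut_format_date_codes.2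
def Claim_exact_format_date_codes : Prop := ∀ (xlsform_format : String), Dom_format_date_codes xlsform_format → D_format_date_codes xlsform_format → format_date_codes xlsform_format ≠ format_date_codes_alt xlsform_format


-- ===== LEMMAS AND PROOFS =====

-- single str.replace pass with pattern ['%', x] and replacement v, as a structural scan
def rep (x : Char) (v : List Char) : List Char → List Char
  | [] => []
  | [c] => [c]
  | c :: c2 :: t =>
    if c = '%' ∧ c2 = x then v ++ rep x v t else c :: rep x v (c2 :: t)

theorem rep_hit (x : Char) (v t : List Char) : rep x v ('%' :: x :: t) = v ++ rep x v t := by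
  simp [rep]

theorem rep_miss2 (x : Char) (v : List Char) {c c2 : Char} (t : List Char)
    (h : ¬ (c = '%' ∧ c2 = x)) : rep x v (c :: c2 :: t) = c :: rep x v (c2 :: t) := by
  simp [rep, h]

theorem rep_cons_ne (x : Char) (v : List Char) {c : Char} (hc : c ≠ '%') :
    ∀ t, rep x v (c :: t) = c :: rep x v t
  | [] => rfl
  | c2 :: t => rep_miss2 x v t (by simp [hc])

theorem rep_cons_of_not_prefix (x : Char) (v : List Char) {c : Char} {t : List Char}
    (h : ¬ (['%', x] <+: (c :: t))) : rep x v (c :: t) = c :: rep x v t := by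
  by_cases hc : c = '%'
  · subst hc
    cases t with
    | nil => rfl
    | cons c2 t' =>
      have hx : c2 ≠ x := by
        rintro rfl; exact h ⟨t', rfl⟩
      exact rep_miss2 x v t' (by simp [hx])
  · exact rep_cons_ne x v hc t

theorem go_eq (x : Char) (v : List Char) :
    ∀ (fuel : Nat) (l acc : List Char), l.length ≤ fuel →
      PySem.Chars.replace.go ['%', x] v fuel l acc = acc.reverse ++ rep x v l := by
  intro fuel
  induction fuel with
  | zero =>
    intro l acc hl
    have : l = [] := List.length_eq_zero_iff.mp (Nat.le_zero.mp hl)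
    subst this
    simp [PySem.Chars.replace.go, rep]
  | succ n ih =>
    intro l acc hl
    cases l with
    | nil => simp [PySem.Chars.replace.go, rep]
    | cons c t =>
      rw [PySem.Chars.replace.go]
      by_cases hp : ['%', x] <+: (c :: t)
      · obtain ⟨r, hr⟩ := hp
        obtain ⟨rfl, rfl⟩ : c = '%' ∧ t = x :: r := by
          have h' := hr
          simp only [List.cons_append, List.nil_append, List.cons.injEq] at h'
          exact ⟨h'.1.symm, h'.2.symm⟩
        rw [if_pos (by rw [List.isPrefixOf_iff_prefix]; exact ⟨r, rfl⟩)]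
        rw [show List.drop (['%', x]).length ('%' :: x :: r) = r from rfl]
        have hlen : r.length ≤ n := by simp at hl; omega
        rw [ih _ _ hlen]
        simp [rep_hit]
      · rw [if_neg (by rw [List.isPrefixOf_iff_prefix]; exact hp)]
        have hlen : t.length ≤ n := by simp at hl; omega
        rw [ih _ _ hlen, rep_cons_of_not_prefix x v hp]
        simp

theorem replace_eq (x : Char) (v l : List Char) :
    PySem.Chars.replace l ['%', x] v = rep x v l := by
  rw [PySem.Chars.replace]
  simp only [List.isEmpty_cons]
  exact go_eq x v l.length l [] le_rfl

-- A's eight passes, composed in the order the dict iterates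
def compA (l : List Char) : List Char :=
  rep 'a' ['d', 'd', 'd'] (rep 'e' ['d'] (rep 'd' ['d', 'd'] (rep 'b' ['M', 'M', 'M']
    (rep 'n' ['M'] (rep 'm' ['M', 'M'] (rep 'y' ['y', 'y'] (rep 'Y' ['y', 'y', 'y', 'y'] l)))))))

theorem A_toList (s : String) : (format_date_codes s).toList = compA s.toList := by
  show (PySem.Str.replace (PySem.Str.replace (PySem.Str.replace (PySem.Str.replace
      (PySem.Str.replace (PySem.Str.replace (PySem.Str.replace (PySem.Str.replace
        s "%Y" "yyyy") "%y" "yy") "%m" "MM") "%n" "M") "%b" "MMM") "%d" "dd")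
        "%e" "d") "%a" "ddd").toList = compA s.toList
  simp only [PySem.Str.toList_replace, compA]
  rw [show ("%Y" : String).toList = ['%', 'Y'] from rfl, show ("yyyy" : String).toList = ['y','y','y','y'] from rfl]
  rw [show ("%y" : String).toList = ['%', 'y'] from rfl, show ("yy" : String).toList = ['y','y'] from rfl]
  rw [show ("%m" : String).toList = ['%', 'm'] from rfl, show ("MM" : String).toList = ['M','M'] from rfl]
  rw [show ("%n" : String).toList = ['%', 'n'] from rfl, show ("M" : String).toList = ['M'] from rfl]
  rw [show ("%b" : String).toList = ['%', 'b'] from rfl, show ("MMM" : String).toList = ['M','M','M'] from rfl]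
  rw [show ("%d" : String).toList = ['%', 'd'] from rfl, show ("dd" : String).toList = ['d','d'] from rfl]
  rw [show ("%e" : String).toList = ['%', 'e'] from rfl, show ("d" : String).toList = ['d'] from rfl]
  rw [show ("%a" : String).toList = ['%', 'a'] from rfl, show ("ddd" : String).toList = ['d','d','d'] from rfl]
  simp only [replace_eq]

-- fdcScan equations
theorem fdc_cons_ne {c : Char} (hc : c ≠ '%') : ∀ t, fdcScan (c :: t) = c :: fdcScan t
  | [] => rfl
  | c2 :: t => by simp [fdcScan, hc]

theorem fdc_hit {c2 : Char} {v : List Char} (h : qgisCode? c2 = some v) (t : List Char) :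
    fdcScan ('%' :: c2 :: t) = v ++ fdcScan t := by
  simp [fdcScan, h]

theorem fdc_miss {c2 : Char} (h : qgisCode? c2 = none) (t : List Char) :
    fdcScan ('%' :: c2 :: t) = '%' :: fdcScan (c2 :: t) := by
  simp [fdcScan, h]

-- head?-tracking lemmas for the pass-through of a leading literal '%'
theorem repPct (x : Char) (v : List Char) {w : List Char} (h : w.head? ≠ some x) :
    rep x v ('%' :: w) = '%' :: rep x v w := by
  cases w with
  | nil => rfl
  | cons c t => exact rep_miss2 x v t (by simp at h; simp [h])

theorem headRep (x : Char) (v : List Char) {w : List Char} (h : ¬ (['%', x] <+: w)) :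
    (rep x v w).head? = w.head? := by
  cases w with
  | nil => rfl
  | cons c t => rw [rep_cons_of_not_prefix x v h]; rfl

theorem headRepOr (x c0 : Char) (v0 : List Char) (w : List Char) :
    (rep x (c0 :: v0) w).head? = w.head? ∨ (rep x (c0 :: v0) w).head? = some c0 := by
  cases w with
  | nil => left; rfl
  | cons c t =>
    cases t with
    | nil => left; rfl
    | cons c2 t' =>
      by_cases h : c = '%' ∧ c2 = x
      · right
        obtain ⟨rfl, rfl⟩ := h
        rw [rep_hit]
        rfl
      · left
        rw [rep_miss2 x (c0 :: v0) t' h]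
        rfl

-- the composite of all eight passes lets a leading '%' through when the rest cannot start a code
theorem comp_pct (u : List Char)
    (h0 : ∀ c, u.head? = some c → qgisCode? c = none)
    (h1 : ¬ (['%', 'Y'] <+: u)) :
    compA ('%' :: u) = '%' :: compA u := by
  have hk : ∀ c, qgisCode? c ≠ none → u.head? ≠ some c := fun c hc he => hc (h0 c he)
  simp only [compA]
  set u1 := rep 'Y' ['y', 'y', 'y', 'y'] u with hu1
  set u2 := rep 'y' ['y', 'y'] u1 with hu2
  set u3 := rep 'm' ['M', 'M'] u2 with hu3
  set u4 := rep 'n' ['M'] u3 with hu4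
  set u5 := rep 'b' ['M', 'M', 'M'] u4 with hu5
  set u6 := rep 'd' ['d', 'd'] u5 with hu6
  set u7 := rep 'e' ['d'] u6 with hu7
  have h1h : u1.head? = u.head? := by rw [hu1]; exact headRep _ _ h1
  have h2h : u2.head? = u.head? ∨ u2.head? = some 'y' := by
    rw [hu2]; rcases headRepOr 'y' 'y' ['y'] u1 with h | h
    · left; rw [h, h1h]
    · right; exact h
  have h3h : u3.head? = u.head? ∨ u3.head? = some 'y' ∨ u3.head? = some 'M' := by
    rw [hu3]; rcases headRepOr 'm' 'M' ['M'] u2 with h | h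
    · rcases h2h with h' | h'
      · left; rw [h, h']
      · right; left; rw [h, h']
    · right; right; exact h
  have h4h : u4.head? = u.head? ∨ u4.head? = some 'y' ∨ u4.head? = some 'M' := by
    rw [hu4]; rcases headRepOr 'n' 'M' [] u3 with h | h
    · rw [h]; exact h3h
    · right; right; exact h
  have h5h : u5.head? = u.head? ∨ u5.head? = some 'y' ∨ u5.head? = some 'M' := by
    rw [hu5]; rcases headRepOr 'b' 'M' ['M', 'M'] u4 with h | h
    · rw [h]; exact h4h
    · right; right; exact h
  have h6h : u6.head? = u.head? ∨ u6.head? = some 'y' ∨ u6.head? = some 'M' ∨ u6.head? = some 'd' := by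
    rw [hu6]; rcases headRepOr 'd' 'd' ['d'] u5 with h | h
    · rw [h]; tauto
    · right; right; right; exact h
  have h7h : u7.head? = u.head? ∨ u7.head? = some 'y' ∨ u7.head? = some 'M' ∨ u7.head? = some 'd' := by
    rw [hu7]; rcases headRepOr 'e' 'd' [] u6 with h | h
    · rw [h]; exact h6h
    · right; right; right; exact h
  have e1 : rep 'Y' ['y', 'y', 'y', 'y'] ('%' :: u) = '%' :: u1 := by
    rw [hu1]; exact repPct _ _ (hk 'Y' (by simp [qgisCode?]))
  have e2 : rep 'y' ['y', 'y'] ('%' :: u1) = '%' :: u2 := by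
    rw [hu2]; exact repPct _ _ (by rw [h1h]; exact hk 'y' (by simp [qgisCode?]))
  have e3 : rep 'm' ['M', 'M'] ('%' :: u2) = '%' :: u3 := by
    rw [hu3]; refine repPct _ _ ?_
    rcases h2h with h | h
    · rw [h]; exact hk 'm' (by simp [qgisCode?])
    · rw [h]; simp
  have e4 : rep 'n' ['M'] ('%' :: u3) = '%' :: u4 := by
    rw [hu4]; refine repPct _ _ ?_
    rcases h3h with h | h | h
    · rw [h]; exact hk 'n' (by simp [qgisCode?])
    · rw [h]; simp
    · rw [h]; simp
  have e5 : rep 'b' ['M', 'M', 'M'] ('%' :: u4) = '%' :: u5 := by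
    rw [hu5]; refine repPct _ _ ?_
    rcases h4h with h | h | h
    · rw [h]; exact hk 'b' (by simp [qgisCode?])
    · rw [h]; simp
    · rw [h]; simp
  have e6 : rep 'd' ['d', 'd'] ('%' :: u5) = '%' :: u6 := by
    rw [hu6]; refine repPct _ _ ?_
    rcases h5h with h | h | h
    · rw [h]; exact hk 'd' (by simp [qgisCode?])
    · rw [h]; simp
    · rw [h]; simp
  have e7 : rep 'e' ['d'] ('%' :: u6) = '%' :: u7 := by
    rw [hu7]; refine repPct _ _ ?_
    rcases h6h with h | h | h | h
    · rw [h]; exact hk 'e' (by simp [qgisCode?])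
    · rw [h]; simp
    · rw [h]; simp
    · rw [h]; simp
  have e8 : rep 'a' ['d', 'd', 'd'] ('%' :: u7) = '%' :: rep 'a' ['d', 'd', 'd'] u7 := by
    refine repPct _ _ ?_
    rcases h7h with h | h | h | h
    · rw [h]; exact hk 'a' (by simp [qgisCode?])
    · rw [h]; simp
    · rw [h]; simp
    · rw [h]; simp
  rw [e1, e2, e3, e4, e5, e6, e7, e8]

-- structured equations for the composite of A's eight passes
theorem comp_cons_ne {c : Char} (hc : c ≠ '%') (t : List Char) :
    compA (c :: t) = c :: compA t := by
  simp [compA, rep_cons_ne _ _ hc]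

theorem comp_key : ∀ {d : Char} {v : List Char}, qgisCode? d = some v →
    ∀ t, compA ('%' :: d :: t) = v ++ compA t := by
  intro d v h t
  by_cases h1 : d = 'Y'
  · subst h1; simp [qgisCode?] at h; subst h; simp [compA, rep_hit, rep_cons_ne]
  by_cases h2 : d = 'y'
  · subst h2; simp [qgisCode?] at h; subst h; simp [compA, rep_hit, rep_miss2, rep_cons_ne]
  by_cases h3 : d = 'm'
  · subst h3; simp [qgisCode?] at h; subst h; simp [compA, rep_hit, rep_miss2, rep_cons_ne]
  by_cases h4 : d = 'n'
  · subst h4; simp [qgisCode?] at h; subst h; simp [compA, rep_hit, rep_miss2, rep_cons_ne]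
  by_cases h5 : d = 'b'
  · subst h5; simp [qgisCode?] at h; subst h; simp [compA, rep_hit, rep_miss2, rep_cons_ne]
  by_cases h6 : d = 'd'
  · subst h6; simp [qgisCode?] at h; subst h; simp [compA, rep_hit, rep_miss2, rep_cons_ne]
  by_cases h7 : d = 'e'
  · subst h7; simp [qgisCode?] at h; subst h; simp [compA, rep_hit, rep_miss2, rep_cons_ne]
  by_cases h8 : d = 'a'
  · subst h8; simp [qgisCode?] at h; subst h; simp [compA, rep_hit, rep_miss2, rep_cons_ne]
  · simp [qgisCode?, h1, h2, h3, h4, h5, h6, h7, h8] at h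

theorem comp_nonkey {d : Char} (hq : qgisCode? d = none) (hd : d ≠ '%') (t : List Char) :
    compA ('%' :: d :: t) = '%' :: d :: compA t := by
  have h1 : d ≠ 'Y' := by rintro rfl; simp [qgisCode?] at hq
  have h2 : d ≠ 'y' := by rintro rfl; simp [qgisCode?] at hq
  have h3 : d ≠ 'm' := by rintro rfl; simp [qgisCode?] at hq
  have h4 : d ≠ 'n' := by rintro rfl; simp [qgisCode?] at hq
  have h5 : d ≠ 'b' := by rintro rfl; simp [qgisCode?] at hq
  have h6 : d ≠ 'd' := by rintro rfl; simp [qgisCode?] at hq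
  have h7 : d ≠ 'e' := by rintro rfl; simp [qgisCode?] at hq
  have h8 : d ≠ 'a' := by rintro rfl; simp [qgisCode?] at hq
  simp [compA, rep_miss2, rep_cons_ne, hd, h1, h2, h3, h4, h5, h6, h7, h8]

theorem notInfix_tail {p : List Char} {c : Char} {t : List Char}
    (h : ¬ (p <:+: (c :: t))) : ¬ (p <:+: t) :=
  fun hi => h (hi.trans (List.suffix_cons c t).isInfix)

theorem notPrefix_bad_nonpct {c : Char} (hc : c ≠ '%') (t : List Char) :
    ¬ (['%', '%', 'Y'] <+: (c :: t)) := by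
  rintro ⟨r, hr⟩
  simp only [List.cons_append, List.nil_append, List.cons.injEq] at hr
  exact hc hr.1.symm

theorem notPrefix_bad_snd {d : Char} (hd : d ≠ '%') (t2 : List Char) :
    ¬ (['%', '%', 'Y'] <+: ('%' :: d :: t2)) := by
  rintro ⟨r, hr⟩
  injection hr with _ h2
  injection h2 with h2a
  exact hd h2a.symm

theorem notPrefix_bad_third {q : List Char} (hY : q.head? ≠ some 'Y') (_ : True) :
    ¬ (['%', '%', 'Y'] <+: ('%' :: '%' :: q)) := by
  rintro ⟨r, hr⟩
  injection hr with _ h2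
  injection h2 with _ h3
  exact hY (by rw [← h3]; rfl)

-- main equivalence on char lists, away from the '%%Y' cascade
theorem mainAux : ∀ (n : Nat) (l : List Char), l.length ≤ n →
    ¬ (['%', '%', 'Y'] <:+: l) → compA l = fdcScan l := by
  intro n
  induction n with
  | zero =>
    intro l hl _
    have : l = [] := List.length_eq_zero_iff.mp (Nat.le_zero.mp hl)
    subst this; rfl
  | succ n ih =>
    intro l hl hb
    cases l with
    | nil => rfl
    | cons c t =>
      by_cases hc : c = '%'
      · subst hc
        cases t with
        | nil => rfl
        | cons d t2 =>
          have hlen2 : t2.length ≤ n := by simp at hl; omega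
          have hb2 : ¬ (['%', '%', 'Y'] <:+: t2) := notInfix_tail (notInfix_tail hb)
          cases hq : qgisCode? d with
          | some v => rw [comp_key hq, fdc_hit hq, ih t2 hlen2 hb2]
          | none =>
            have hlen1 : (d :: t2).length ≤ n := by simp at hl ⊢; omega
            have hb1 : ¬ (['%', '%', 'Y'] <:+: (d :: t2)) := notInfix_tail hb
            by_cases hdp : d = '%'
            · subst hdp
              have hpre : ¬ (['%', 'Y'] <+: ('%' :: t2)) := by
                rintro ⟨r, hr⟩
                simp at hr
                exact hb ⟨[], r, by simp [← hr]⟩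
              rw [comp_pct ('%' :: t2)
                    (by rintro c he'; simp at he'; rw [← he']; simp [qgisCode?]) hpre,
                  ih ('%' :: t2) hlen1 hb1, fdc_miss (by simp [qgisCode?]) t2]
            · rw [comp_nonkey hq hdp, fdc_miss hq, fdc_cons_ne hdp, ih t2 hlen2 hb2]
      · have hlen1 : t.length ≤ n := by simp at hl; omega
        have hb1 : ¬ (['%', '%', 'Y'] <:+: t) := notInfix_tail hb
        rw [fdc_cons_ne hc t, comp_cons_ne hc t, ih t hlen1 hb1]

-- wherever '%%Y' occurs, the two programs disagree: A's cascade begins with 'y', B keeps the '%'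
theorem tightAux : ∀ (n : Nat) (l : List Char), l.length ≤ n →
    (['%', '%', 'Y'] <:+: l) → compA l ≠ fdcScan l := by
  intro n
  induction n with
  | zero =>
    intro l hl hinf
    have : l = [] := List.length_eq_zero_iff.mp (Nat.le_zero.mp hl)
    subst this
    exact absurd hinf.length_le (by simp)
  | succ n ih =>
    intro l hl hinf
    cases l with
    | nil => exact absurd hinf.length_le (by simp)
    | cons c t =>
      by_cases hc : c = '%'
      · subst hc
        cases t with
        | nil => exact absurd hinf.length_le (by simp)
        | cons d t2 =>
          have hlen2 : t2.length ≤ n := by simp at hl; omega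
          cases hq : qgisCode? d with
          | some v =>
            have hdp : d ≠ '%' := by rintro rfl; simp [qgisCode?] at hq
            have hin2 : ['%', '%', 'Y'] <:+: t2 :=
              ((List.infix_cons_iff.mp ((List.infix_cons_iff.mp hinf).resolve_left
                (notPrefix_bad_snd hdp t2))).resolve_left
                (notPrefix_bad_nonpct hdp t2))
            rw [comp_key hq, fdc_hit hq]
            intro he
            exact ih t2 hlen2 hin2 (List.append_cancel_left he)
          | none =>
            have hlen1 : (d :: t2).length ≤ n := by simp at hl ⊢; omega
            by_cases hdp : d = '%'
            · subst hdp
              by_cases hY : t2.head? = some 'Y'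
              · -- the occurrence is right here: A cascades to 'y'…, B keeps the '%'
                cases t2 with
                | nil => simp at hY
                | cons e q =>
                  have : e = 'Y' := by simpa using hY
                  subst this
                  rw [fdc_miss (show qgisCode? '%' = none from rfl) ('Y' :: q),
                      fdc_hit (show qgisCode? 'Y' = some ['y', 'y', 'y', 'y'] from rfl) q]
                  simp [compA, rep_hit, rep_miss2, rep_cons_ne]
              · have hpre : ¬ (['%', 'Y'] <+: ('%' :: t2)) := by
                  rintro ⟨r, hr⟩
                  injection hr with _ h2
                  exact hY (by rw [← h2]; rfl)
                have hin1 : ['%', '%', 'Y'] <:+: ('%' :: t2) :=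
                  (List.infix_cons_iff.mp hinf).resolve_left
                    (notPrefix_bad_third hY trivial)
                rw [comp_pct ('%' :: t2)
                      (by rintro c he'; simp at he'; rw [← he']; simp [qgisCode?]) hpre,
                    fdc_miss (by simp [qgisCode?]) t2]
                intro he
                exact ih ('%' :: t2) hlen1 hin1 (by simpa using he)
            · have hin1 : ['%', '%', 'Y'] <:+: (d :: t2) :=
                (List.infix_cons_iff.mp hinf).resolve_left (notPrefix_bad_snd hdp t2)
              have hin2 : ['%', '%', 'Y'] <:+: t2 :=
                (List.infix_cons_iff.mp hin1).resolve_left (notPrefix_bad_nonpct hdp t2)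
              rw [comp_nonkey hq hdp, fdc_miss hq, fdc_cons_ne hdp]
              intro he
              exact ih t2 hlen2 hin2 (by simpa using he)
      · have hlen1 : t.length ≤ n := by simp at hl; omega
        have hin1 : ['%', '%', 'Y'] <:+: t :=
          (List.infix_cons_iff.mp hinf).resolve_left (notPrefix_bad_nonpct hc t)
        rw [fdc_cons_ne hc t, comp_cons_ne hc t]
        intro he
        exact ih t hlen1 hin1 (by simpa using he)

theorem B_toList (s : String) : (format_date_codes_alt s).toList = fdcScan s.toList := by
  simp [format_date_codes_alt]

-- ===== VERDICT (by name: the statement is the Claim_ definition above) =====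
theorem format_date_codes_spec : Claim_unchanged_format_date_codes := by
  intro s _ hnd
  have hni : ¬ (['%', '%', 'Y'] <:+: s.toList) := by
    have hf : PySem.Chars.isIn ("%%Y").toList s.toList = false := by
      have h' : ¬ PySem.Str.isIn "%%Y" s = true := hnd
      rw [PySem.Str.isIn_eq] at h'
      exact Bool.eq_false_iff.mpr h'
    exact (PySem.Chars.isIn_eq_false_iff _ _).mp hf
  apply String.toList_inj.mp
  rw [A_toList, B_toList]
  exact mainAux s.toList.length s.toList le_rfl hni

theorem format_date_codes_changed : Claim_changed_format_date_codes := by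
  unfold Claim_changed_format_date_codes; decide

theorem format_date_codes_tight : Claim_exact_format_date_codes := by
  intro s _ hd
  have hi : ['%', '%', 'Y'] <:+: s.toList := by
    have h' : PySem.Chars.isIn ("%%Y").toList s.toList = true := by
      rw [← PySem.Str.isIn_eq]; exact hd
    exact (PySem.Chars.isIn_iff_infix _ _).mp h'
  intro he
  exact tightAux s.toList.length s.toList le_rfl hi
    (by rw [← A_toList, ← B_toList, he])
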